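-- pv_equiv track=rewrite | github.com/yarynapavlyshyn/CodeU-Group8 | Assignment5/LanguageClass.py | _update_graph_with_first_letters
-- ===== SOURCE A (Python) =====
-- def _update_graph_with_first_letters(first_letters, graph):
--     """
--     Add all elements in first_letters to the dictionary in terms
--     :param first_letters: list(str)
--     :param graph: dictionary(str, str)
--     :return: dictionary(str, str)
--     """
--     i = 1
--     for let in first_letters:  # (n) times
--         # (n-1)+(n-2)+(n-3)+(n-4)+…+(n-n) = n^2–(1+2+3+…+n) = n^2–(n+1)*n/2 = 2n2– n2–n)/2 = (n-1)*n/2 -->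
--         for j in range(i, len(first_letters)):  # (n-1)*n/2 times
--             righter_let = first_letters[j]
--             if righter_let != let and righter_let not in graph[let]:  # O(1)
--                 graph[let].add(righter_let)  # O(1)
--         i += 1
--     return graph
-- ===== SOURCE B (Python) =====
-- def _update_graph_with_first_letters(first_letters, graph):
--     # Single left-to-right pass: keep the distinct letters seen so far (in first-
--     # occurrence order) and add the current letter to each of their sets.
--     seen = []
--     for x in first_letters:
--         for k in seen:
--             if x != k:
--                 graph[k].add(x)
--         if x not in seen:
--             seen.append(x)
--     return graph
-- ===== Notes on version B (the rewrite author's own statement) =====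
-- stated objective: faster
-- what changed: A scans, for every position, the whole remaining suffix of first_letters; B makes one left-to-right pass that updates only the sets of the distinct letters seen so far, so the inner loop runs over distinct letters instead of all remaining positions.
import Mathlib
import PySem

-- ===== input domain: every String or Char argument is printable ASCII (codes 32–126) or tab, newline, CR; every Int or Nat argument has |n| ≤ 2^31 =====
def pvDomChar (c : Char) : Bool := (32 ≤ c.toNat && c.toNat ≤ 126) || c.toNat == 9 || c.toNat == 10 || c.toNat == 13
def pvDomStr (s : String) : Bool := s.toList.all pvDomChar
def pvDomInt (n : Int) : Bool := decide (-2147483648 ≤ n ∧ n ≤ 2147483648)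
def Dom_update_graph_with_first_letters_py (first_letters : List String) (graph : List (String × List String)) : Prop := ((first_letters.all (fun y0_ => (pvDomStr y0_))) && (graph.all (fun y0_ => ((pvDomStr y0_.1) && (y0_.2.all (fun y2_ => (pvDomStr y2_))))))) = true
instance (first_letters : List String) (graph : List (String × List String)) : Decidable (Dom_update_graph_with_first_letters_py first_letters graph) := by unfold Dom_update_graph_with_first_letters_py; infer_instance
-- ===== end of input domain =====

-- B replaces A's per-position scan over the whole remaining suffix by a single left-to-right
-- pass that updates the sets of the distinct letters seen so far (objective: faster on
-- duplicate-heavy input; both ports mutate nothing — the equivalence is about the returned dict).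

-- Shared dict helpers: graph[k] (first match) and in-place update of graph[k] (first match;
-- unchanged when k is absent — Python raises KeyError there, excluded by Pre_).
def pvLookup (g : List (String × List String)) (k : String) : Option (List String) :=
  match g with
  | [] => none
  | (k', v) :: t => if k' = k then some v else pvLookup t k

def pvModify (g : List (String × List String)) (k : String) (f : List String → List String) :
    List (String × List String) :=
  match g with
  | [] => []
  | (k', v) :: t => if k' = k then (k', f v) :: t else (k', v) :: pvModify t k f

-- ===== PORT A =====
-- i = 1; for let in first_letters: for j in range(i, len(first_letters)): …; i += 1
def update_graph_with_first_letters_py (first_letters : List String) (graph : List (String × List String)) : List (String × List String) :=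
  (first_letters.foldl
    (fun (st : List (String × List String) × Int) lt =>
      ((PySem.List.pyRange st.2 (first_letters.length : Int) 1).foldl
        (fun g j =>
          match PySem.List.pyGet? first_letters j with
          | none => g              -- unreachable: j ∈ range(i, len)
          | some r =>
            if r ≠ lt then         -- short-circuit: graph[lt] only evaluated when r != lt
              match pvLookup g lt with
              | none => g          -- Python: KeyError (excluded by Pre_)
              | some s =>
                if s.contains r then g
                else pvModify g lt (fun v => PySem.Set.add v r)   -- graph[lt].add(r)
            else g)
        st.1,
       st.2 + 1))
    (graph, (1 : Int))).1

-- ===== PORT B =====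
-- seen = []; for x in first_letters: for k in seen: if x != k: graph[k].add(x); append new x
def update_graph_with_first_letters_py_alt (first_letters : List String) (graph : List (String × List String)) : List (String × List String) :=
  (first_letters.foldl
    (fun (st : List (String × List String) × List String) x =>
      (st.2.foldl
        (fun g k =>
          if x ≠ k then pvModify g k (fun v => PySem.Set.add v x)   -- graph[k].add(x); k absent = KeyError, excluded by Pre_
          else g)
        st.1,
       if x ∈ st.2 then st.2 else st.2 ++ [x]))
    (graph, ([] : List String))).1

-- ===== PRECONDITION & SPEC =====
-- Pre_: exactly the inputs where Python A (and B) return normally: a letter needs an entry in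
-- graph only if some strictly later letter differs from it (otherwise graph[letter] is never
-- evaluated and no KeyError is raised).
def Pre_update_graph_with_first_letters_py (first_letters : List String) (graph : List (String × List String)) : Prop :=
  ∀ i : Fin first_letters.length,
    (∃ j : Fin first_letters.length, i.1 < j.1 ∧ first_letters.get j ≠ first_letters.get i) →
    first_letters.get i ∈ graph.map Prod.fst
instance (first_letters : List String) (graph : List (String × List String)) : Decidable (Pre_update_graph_with_first_letters_py first_letters graph) := by unfold Pre_update_graph_with_first_letters_py; infer_instance

def pvWitness_update_graph_with_first_letters_py : List String × (List (String × List String)) :=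
  (["a", "b", "a"], [("a", ["x"]), ("b", [])])

def Spec_update_graph_with_first_letters_py (first_letters : List String) (graph : List (String × List String)) (out : List (String × List String)) : Prop := out = update_graph_with_first_letters_py_alt first_letters graph
instance (first_letters : List String) (graph : List (String × List String)) (out : List (String × List String)) : Decidable (Spec_update_graph_with_first_letters_py first_letters graph out) := by unfold Spec_update_graph_with_first_letters_py; infer_instance

-- ===== CLAIM (what is proved, stated in full; the proofs are below) =====
def Claim_equal_update_graph_with_first_letters_py : Prop := ∀ (first_letters : List String) (graph : List (String × List String)), Dom_update_graph_with_first_letters_py first_letters graph → Pre_update_graph_with_first_letters_py first_letters graph → Spec_update_graph_with_first_letters_py first_letters graph (update_graph_with_first_letters_py first_letters graph)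

-- ===== LEMMAS AND PROOFS =====

-- Abbreviations for the proof: one update step, and a whole pass of updates on one key.
def pvU (g : List (String × List String)) (k x : String) : List (String × List String) :=
  pvModify g k (fun v => PySem.Set.add v x)

def pvStep (g : List (String × List String)) (k x : String) : List (String × List String) :=
  if x = k then g else pvU g k x

def pvAddList (g : List (String × List String)) (k : String) (l : List String) :
    List (String × List String) :=
  l.foldl (fun g r => pvStep g k r) g

-- value-level pass on one key
def pvFoldAdd (k : String) (l : List String) (v : List String) : List String :=
  l.foldl (fun v r => if r = k then v else PySem.Set.add v r) v

-- structural forms of the two ports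
def pvARec : List String → List (String × List String) → List (String × List String)
  | [], g => g
  | lt :: rest, g => pvARec rest (pvAddList g lt rest)

def pvBRec : List String → List (String × List String) × List String → List (String × List String)
  | [], st => st.1
  | x :: rest, st =>
      pvBRec rest (st.2.foldl (fun g k => pvStep g k x) st.1,
                   if x ∈ st.2 then st.2 else st.2 ++ [x])

theorem pvModify_id (g : List (String × List String)) (k : String) :
    pvModify g k (fun v => v) = g := by
  induction g with
  | nil => rfl
  | cons p t ih =>
    obtain ⟨k0, v⟩ := p
    by_cases h : k0 = k <;> simp [pvModify, h, ih]

theorem pvModify_congr (g : List (String × List String)) (k : String)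
    (f f' : List String → List String) (h : ∀ v, f v = f' v) :
    pvModify g k f = pvModify g k f' := by
  induction g with
  | nil => rfl
  | cons p t ih =>
    obtain ⟨k0, v⟩ := p
    by_cases h0 : k0 = k <;> simp [pvModify, h0, ih, h]

theorem pvModify_comm (g : List (String × List String)) (k k' : String)
    (f f' : List String → List String) (hk : k ≠ k') :
    pvModify (pvModify g k f) k' f' = pvModify (pvModify g k' f') k f := by
  induction g with
  | nil => rfl
  | cons p t ih =>
    obtain ⟨k0, v⟩ := p
    by_cases h1 : k0 = k
    · have h2 : ¬ k0 = k' := by rw [h1]; exact hk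
      simp [pvModify, h1, hk]
    · by_cases h2 : k0 = k' <;> simp [pvModify, h1, h2, ih, Ne.symm hk]

theorem pvModify_pvModify (g : List (String × List String)) (k : String)
    (f f' : List String → List String) :
    pvModify (pvModify g k f') k f = pvModify g k (fun v => f (f' v)) := by
  induction g with
  | nil => rfl
  | cons p t ih =>
    obtain ⟨k0, v⟩ := p
    by_cases h : k0 = k <;> simp [pvModify, h, ih]

theorem pvModify_eq_of_lookup_none (g : List (String × List String)) (k : String)
    (f : List String → List String) (h : pvLookup g k = none) : pvModify g k f = g := by
  induction g with
  | nil => rfl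
  | cons p t ih =>
    obtain ⟨k0, v⟩ := p
    by_cases h0 : k0 = k <;> simp_all [pvModify, pvLookup]

theorem pvModify_eq_of_fix (g : List (String × List String)) (k : String) (s : List String)
    (f : List String → List String) (h : pvLookup g k = some s) (hf : f s = s) :
    pvModify g k f = g := by
  induction g with
  | nil => rfl
  | cons p t ih =>
    obtain ⟨k0, v⟩ := p
    by_cases h0 : k0 = k <;> simp_all [pvModify, pvLookup]

-- commuting updates on distinct keys
theorem pvStep_pvModify_comm (g : List (String × List String)) (k k' : String)
    (x : String) (f : List String → List String) (hk : k ≠ k') :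
    pvModify (pvStep g k x) k' f = pvStep (pvModify g k' f) k x := by
  unfold pvStep pvU; split
  · rfl
  · exact pvModify_comm _ _ _ _ _ hk

theorem pvAddList_pvModify_comm (g : List (String × List String)) (k k' : String)
    (l : List String) (f : List String → List String) (hk : k ≠ k') :
    pvModify (pvAddList g k l) k' f = pvAddList (pvModify g k' f) k l := by
  induction l generalizing g with
  | nil => rfl
  | cons r l ih =>
    show pvModify (pvAddList (pvStep g k r) k l) k' f = pvAddList (pvModify g k' f) k (r :: l)
    rw [ih, pvStep_pvModify_comm _ _ _ _ _ hk]
    rfl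

theorem pvStep_pvAddList_comm (g : List (String × List String)) (k k' : String)
    (l : List String) (x : String) (hk : k ≠ k') :
    pvAddList (pvStep g k' x) k l = pvStep (pvAddList g k l) k' x := by
  unfold pvStep pvU; split
  · rfl
  · exact (pvAddList_pvModify_comm g k k' l _ hk).symm

theorem pvAddList_pvAddList_comm (g : List (String × List String)) (k k' : String)
    (l l' : List String) (hk : k ≠ k') :
    pvAddList (pvAddList g k' l') k l = pvAddList (pvAddList g k l) k' l' := by
  induction l' generalizing g with
  | nil => rfl
  | cons r l' ih =>
    show pvAddList (pvAddList (pvStep g k' r) k' l') k l = pvAddList (pvAddList g k l) k' (r :: l')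
    rw [ih, pvStep_pvAddList_comm _ _ _ _ _ hk]
    rfl

theorem pvAddList_eq_pvModify (g : List (String × List String)) (k : String) (l : List String) :
    pvAddList g k l = pvModify g k (fun v => pvFoldAdd k l v) := by
  induction l generalizing g with
  | nil =>
    show g = pvModify g k (fun v => v)
    rw [pvModify_id]
  | cons r l ih =>
    show pvAddList (pvStep g k r) k l = pvModify g k (fun v => pvFoldAdd k (r :: l) v)
    rw [ih]
    by_cases h : r = k
    · have h1 : pvStep g k r = g := by simp [pvStep, h]
      rw [h1]
      exact pvModify_congr _ _ _ _ (fun v => by simp [pvFoldAdd, h])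
    · have h1 : pvStep g k r = pvModify g k (fun v => PySem.Set.add v r) := by
        simp [pvStep, pvU, h]
      rw [h1, pvModify_pvModify]
      exact pvModify_congr _ _ _ _ (fun v => by simp [pvFoldAdd, h])

theorem mem_pySetAdd (v : List String) (a r : String) (h : a ∈ v) : a ∈ PySem.Set.add v r := by
  simp [PySem.Set.add]; split <;> simp [h]

theorem self_mem_pySetAdd (v : List String) (r : String) : r ∈ PySem.Set.add v r := by
  by_cases h : r ∈ v <;> simp [PySem.Set.add, h]

theorem pySetAdd_eq_of_mem (v : List String) (r : String) (h : r ∈ v) :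
    PySem.Set.add v r = v := by
  simp [PySem.Set.add, h]

theorem mem_pvFoldAdd_of_mem (k : String) (l : List String) (a : String) :
    ∀ v, a ∈ v → a ∈ pvFoldAdd k l v := by
  induction l with
  | nil => intro v h; exact h
  | cons r l ih =>
    intro v h
    show a ∈ pvFoldAdd k l (if r = k then v else PySem.Set.add v r)
    by_cases hr : r = k
    · rw [if_pos hr]; exact ih v h
    · rw [if_neg hr]; exact ih _ (mem_pySetAdd v a r h)

theorem mem_pvFoldAdd (k : String) (l : List String) (r : String) (hk : r ≠ k) :
    ∀ v, r ∈ l → r ∈ pvFoldAdd k l v := by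
  induction l with
  | nil => intro v h; cases h
  | cons r0 l ih =>
    intro v hr
    show r ∈ pvFoldAdd k l (if r0 = k then v else PySem.Set.add v r0)
    rcases List.mem_cons.mp hr with h | h
    · subst h
      rw [if_neg hk]
      exact mem_pvFoldAdd_of_mem _ _ _ _ (self_mem_pySetAdd v r)
    · exact ih _ h

theorem pvFoldAdd_eq_of_subset (k : String) (l : List String) :
    ∀ v, (∀ r ∈ l, r ≠ k → r ∈ v) → pvFoldAdd k l v = v := by
  induction l with
  | nil => intro v _; rfl
  | cons r l ih =>
    intro v h
    show pvFoldAdd k l (if r = k then v else PySem.Set.add v r) = v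
    by_cases hr : r = k
    · rw [if_pos hr]; exact ih v (fun r' h1 h2 => h r' (List.mem_cons_of_mem _ h1) h2)
    · rw [if_neg hr, pySetAdd_eq_of_mem v r (h r List.mem_cons_self hr)]
      exact ih v (fun r' h1 h2 => h r' (List.mem_cons_of_mem _ h1) h2)

theorem pvFoldAdd_idem (k : String) (l : List String) (v : List String) :
    pvFoldAdd k l (pvFoldAdd k l v) = pvFoldAdd k l v :=
  pvFoldAdd_eq_of_subset _ _ _ (fun r hr hk => mem_pvFoldAdd k l r hk v hr)

theorem pvAddList_idem (g : List (String × List String)) (k : String) (l : List String) :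
    pvAddList (pvAddList g k l) k l = pvAddList g k l := by
  rw [pvAddList_eq_pvModify, pvAddList_eq_pvModify, pvModify_pvModify]
  exact pvModify_congr _ _ _ _ (fun v => pvFoldAdd_idem k l v)

-- move an "add to one key" pass through a fold over other keys
theorem pvAddList_foldl_comm (ks : List String) (k1 : String) (rest : List String)
    (h : List (String × List String) → String → List (String × List String))
    (hc : ∀ g k, k ∈ ks → pvAddList (h g k) k1 rest = h (pvAddList g k1 rest) k) :
    ∀ b, pvAddList (ks.foldl h b) k1 rest = ks.foldl h (pvAddList b k1 rest) := by
  induction ks with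
  | nil => intro b; rfl
  | cons k ks ih =>
    intro b
    simp only [List.foldl_cons]
    rw [ih (fun g k' hk' => hc g k' (List.mem_cons_of_mem _ hk')) (h b k),
        hc b k List.mem_cons_self]

-- interleaving the "add x to every seen key" pass with the "add rest to every seen key" pass
theorem pvInterchange (seen : List String) (x : String) (rest : List String)
    (hnd : seen.Nodup) :
    ∀ g, seen.foldl (fun g k => pvAddList g k rest) (seen.foldl (fun g k => pvStep g k x) g)
      = seen.foldl (fun g k => pvAddList (pvStep g k x) k rest) g := by
  induction seen with
  | nil => intro g; rfl
  | cons k1 ks ih =>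
    intro g
    have hk1 : k1 ∉ ks := (List.nodup_cons.mp hnd).1
    have hnd' : ks.Nodup := (List.nodup_cons.mp hnd).2
    simp only [List.foldl_cons]
    rw [pvAddList_foldl_comm ks k1 rest (fun g k => pvStep g k x)
        (fun g k hk => pvStep_pvAddList_comm g k1 k rest x
          (fun he => hk1 (by rw [he]; exact hk)))]
    exact ih hnd' _

theorem pvAbsorb (seen : List String) (x : String) (rest : List String)
    (hnd : seen.Nodup) (hx : x ∈ seen) :
    ∀ g, pvAddList (seen.foldl (fun g k => pvAddList (pvStep g k x) k rest) g) x rest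
      = seen.foldl (fun g k => pvAddList (pvStep g k x) k rest) g := by
  induction seen with
  | nil => cases hx
  | cons k1 ks ih =>
    intro g
    have hk1 : k1 ∉ ks := (List.nodup_cons.mp hnd).1
    have hnd' : ks.Nodup := (List.nodup_cons.mp hnd).2
    simp only [List.foldl_cons]
    rcases List.mem_cons.mp hx with h | h
    · subst h
      rw [pvAddList_foldl_comm ks x rest (fun g k => pvAddList (pvStep g k x) k rest)
          (fun g k hk => by
            have hkx : x ≠ k := fun he => hk1 (by rw [he]; exact hk)
            rw [pvAddList_pvAddList_comm _ _ _ _ _ hkx,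
                pvStep_pvAddList_comm g x k rest x hkx])]
      congr 1
      have h1 : pvStep g x x = g := by simp [pvStep]
      rw [h1, pvAddList_idem]
    · exact ih hnd' h _

-- main simulation: B's pass equals A's recursion after pre-adding the suffix to all seen keys
theorem pvMain (l : List String) :
    ∀ (g : List (String × List String)) (seen : List String), seen.Nodup →
    pvBRec l (g, seen) = pvARec l (seen.foldl (fun g k => pvAddList g k l) g) := by
  induction l with
  | nil =>
    intro g seen _
    have h : ∀ ks : List String,
        List.foldl (fun (g' : List (String × List String)) (_ : String) => g') g ks = g := by
      intro ks
      induction ks with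
      | nil => rfl
      | cons k ks ih => exact ih
    show g = pvARec [] (seen.foldl (fun g' _ => g') g)
    rw [h seen]
    rfl
  | cons x rest ih =>
    intro g seen hnd
    have hpre : seen.foldl (fun g k => pvAddList g k (x :: rest)) g
        = seen.foldl (fun g k => pvAddList (pvStep g k x) k rest) g := rfl
    show pvBRec rest (seen.foldl (fun g k => pvStep g k x) g,
        if x ∈ seen then seen else seen ++ [x])
      = pvARec rest (pvAddList (seen.foldl (fun g k => pvAddList g k (x :: rest)) g) x rest)
    rw [hpre]
    by_cases hx : x ∈ seen
    · rw [if_pos hx, ih _ _ hnd, pvInterchange _ _ _ hnd, pvAbsorb _ _ _ hnd hx]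
    · have hnd' : (seen ++ [x]).Nodup := by
        simp [List.nodup_append, hnd]
        intro a ha he
        exact hx (he ▸ ha)
      rw [if_neg hx, ih _ _ hnd']
      simp only [List.foldl_append, List.foldl_cons, List.foldl_nil]
      rw [pvInterchange _ _ _ hnd]

-- Port B computes pvBRec
theorem portB_eq_pvBRec (fl : List String) :
    ∀ (g : List (String × List String)) (seen : List String),
    (fl.foldl
      (fun (st : List (String × List String) × List String) x =>
        (st.2.foldl (fun g k => if x ≠ k then pvModify g k (fun v => PySem.Set.add v x) else g) st.1,
         if x ∈ st.2 then st.2 else st.2 ++ [x]))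
      (g, seen)).1 = pvBRec fl (g, seen) := by
  induction fl with
  | nil => intro g seen; rfl
  | cons x rest ih =>
    intro g seen
    simp only [List.foldl_cons]
    rw [ih]
    have hfun : (fun (g : List (String × List String)) (k : String) =>
        if x ≠ k then pvModify g k (fun v => PySem.Set.add v x) else g)
      = fun g k => pvStep g k x := by
      funext g k
      by_cases h : x = k <;> simp [pvStep, pvU, h]
    rw [hfun]
    rfl

-- Port A's inner loop over range(i, n) is a pvAddList over the dropped suffix
theorem portA_inner (fl : List String) (lt : String) (t : List String) :
    ∀ (i : Nat), fl.drop i = t → ∀ g,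
    (PySem.List.pyRange (i : Int) (fl.length : Int) 1).foldl
      (fun g j =>
        match PySem.List.pyGet? fl j with
        | none => g
        | some r =>
          if r ≠ lt then
            match pvLookup g lt with
            | none => g
            | some s =>
              if s.contains r then g
              else pvModify g lt (fun v => PySem.Set.add v r)
          else g) g
      = pvAddList g lt t := by
  induction t with
  | nil =>
    intro i ht g
    have hlen : fl.length ≤ i := by
      have := congrArg List.length ht; simp at this; omega
    rw [PySem.List.pyRange_one_eq_nil (by exact_mod_cast hlen)]
    rfl
  | cons r t ih =>
    intro i ht g
    have hi : i < fl.length := by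
      have := congrArg List.length ht; simp at this; omega
    have hdrop : fl.drop i = fl[i] :: fl.drop (i + 1) := List.drop_eq_getElem_cons hi
    have h2 := hdrop.symm.trans ht
    rw [List.cons.injEq] at h2
    obtain ⟨hr, ht'⟩ := h2
    rw [PySem.List.pyRange_one_cons (by exact_mod_cast hi)]
    simp only [List.foldl_cons]
    have hget : PySem.List.pyGet? fl (i : Int) = some r := by
      rw [PySem.List.pyGet?_natCast, List.getElem?_eq_getElem hi, hr]
    have hstep :
        (match PySem.List.pyGet? fl (i : Int) with
          | none => g
          | some r =>
            if r ≠ lt then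
              match pvLookup g lt with
              | none => g
              | some s =>
                if s.contains r then g
                else pvModify g lt (fun v => PySem.Set.add v r)
            else g) = pvStep g lt r := by
      rw [hget]
      by_cases hrl : r = lt
      · simp [hrl, pvStep]
      · have hrhs : pvStep g lt r = pvModify g lt (fun v => PySem.Set.add v r) := by
          simp [pvStep, pvU, hrl]
        simp only [ne_eq, hrl, not_false_eq_true, if_true, hrhs]
        cases hlk : pvLookup g lt with
        | none =>
          show g = pvModify g lt (fun v => PySem.Set.add v r)
          exact (pvModify_eq_of_lookup_none g lt _ hlk).symm
        | some s =>
          show (if s.contains r = true then g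
                else pvModify g lt (fun v => PySem.Set.add v r))
            = pvModify g lt (fun v => PySem.Set.add v r)
          by_cases hc : s.contains r = true
          · rw [if_pos hc]
            refine (pvModify_eq_of_fix g lt s _ hlk ?_).symm
            have : r ∈ s := by simpa using hc
            exact pySetAdd_eq_of_mem s r this
          · rw [if_neg hc]
    rw [hstep]
    have hcast : ((i : Int) + 1) = (((i + 1 : Nat)) : Int) := by push_cast; ring
    rw [hcast, ih (i + 1) ht' (pvStep g lt r)]
    rfl

-- Port A computes pvARec
theorem portA_eq_pvARec (fl : List String) (l : List String) :
    ∀ (m : Nat), fl.drop m = l → ∀ g,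
    (l.foldl
      (fun (st : List (String × List String) × Int) lt =>
        ((PySem.List.pyRange st.2 (fl.length : Int) 1).foldl
          (fun g j =>
            match PySem.List.pyGet? fl j with
            | none => g
            | some r =>
              if r ≠ lt then
                match pvLookup g lt with
                | none => g
                | some s =>
                  if s.contains r then g
                  else pvModify g lt (fun v => PySem.Set.add v r)
              else g)
          st.1,
         st.2 + 1))
      (g, ((m : Int) + 1))).1 = pvARec l g := by
  induction l with
  | nil => intro m _ g; rfl
  | cons lt rest ih =>
    intro m hm g
    have hlen : m < fl.length := by
      have := congrArg List.length hm; simp at this; omega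
    have hdrop : fl.drop m = fl[m] :: fl.drop (m + 1) := List.drop_eq_getElem_cons hlen
    have h2 := hdrop.symm.trans hm
    rw [List.cons.injEq] at h2
    obtain ⟨_, hm'⟩ := h2
    simp only [List.foldl_cons]
    have hcast : ((m : Int) + 1) = (((m + 1 : Nat)) : Int) := by push_cast; ring
    rw [hcast, portA_inner fl lt rest (m + 1) hm' g]
    exact ih (m + 1) hm' (pvAddList g lt rest)

-- ===== VERDICT (by name: the statement is the Claim_ definition above) =====
theorem update_graph_with_first_letters_py_spec : Claim_equal_update_graph_with_first_letters_py := by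
  intro fl g _ _
  unfold Spec_update_graph_with_first_letters_py
  unfold update_graph_with_first_letters_py update_graph_with_first_letters_py_alt
  rw [portB_eq_pvBRec]
  have hA := portA_eq_pvARec fl fl 0 (by simp) g
  simp only [Nat.cast_zero, zero_add] at hA
  rw [hA]
  have := pvMain fl g [] List.nodup_nil
  simpa using this.symm
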